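-- pv_equiv track=rewrite | github.com/kelvinhuang0327/number-pattern-research | tools/backtest_biglotto_6bet_ewma.py | cold_numbers_bet
-- ===== SOURCE A (Python) =====
-- from collections import Counter
--
-- MAX_NUM = 49
--
-- PICK = 6
--
-- def cold_numbers_bet(history, window=100, exclude=None):
--     exclude = exclude or set()
--     recent = history[-window:] if len(history) >= window else history
--     freq = Counter(n for d in recent for n in d['numbers'] if n <= MAX_NUM)
--     candidates = sorted(
--         [n for n in range(1, MAX_NUM + 1) if n not in exclude],
--         key=lambda x: freq.get(x, 0)
--     )
--     return sorted(candidates[:PICK])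
-- ===== SOURCE B (Python) =====
-- from collections import Counter
--
-- MAX_NUM = 49
-- PICK = 6
--
-- def cold_numbers_bet(history, window=100, exclude=None):
--     # Rank-based selection: a candidate is picked iff fewer than PICK candidates
--     # precede it in the (frequency, number) lexicographic order; the resulting
--     # comprehension is already in ascending numeric order, so no sort is needed.
--     exclude = exclude or set()
--     recent = history[-window:] if len(history) >= window else history
--     freq = Counter(n for d in recent for n in d['numbers'] if n <= MAX_NUM)
--
--     def rank(n):
--         return len([m for m in range(1, MAX_NUM + 1)
--                     if m not in exclude
--                     and (freq.get(m, 0), m) < (freq.get(n, 0), n)])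
--
--     return [n for n in range(1, MAX_NUM + 1)
--             if n not in exclude and rank(n) < PICK]
-- ===== Notes on version B (the rewrite author's own statement) =====
-- stated objective: alternative
-- what changed: Replaces the stable sort of all candidates plus slice plus final sort by a sort-free rank-based selection: a candidate is emitted (already in ascending numeric order) iff fewer than 6 candidates precede it in the (frequency, number) lexicographic order.
import Mathlib
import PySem

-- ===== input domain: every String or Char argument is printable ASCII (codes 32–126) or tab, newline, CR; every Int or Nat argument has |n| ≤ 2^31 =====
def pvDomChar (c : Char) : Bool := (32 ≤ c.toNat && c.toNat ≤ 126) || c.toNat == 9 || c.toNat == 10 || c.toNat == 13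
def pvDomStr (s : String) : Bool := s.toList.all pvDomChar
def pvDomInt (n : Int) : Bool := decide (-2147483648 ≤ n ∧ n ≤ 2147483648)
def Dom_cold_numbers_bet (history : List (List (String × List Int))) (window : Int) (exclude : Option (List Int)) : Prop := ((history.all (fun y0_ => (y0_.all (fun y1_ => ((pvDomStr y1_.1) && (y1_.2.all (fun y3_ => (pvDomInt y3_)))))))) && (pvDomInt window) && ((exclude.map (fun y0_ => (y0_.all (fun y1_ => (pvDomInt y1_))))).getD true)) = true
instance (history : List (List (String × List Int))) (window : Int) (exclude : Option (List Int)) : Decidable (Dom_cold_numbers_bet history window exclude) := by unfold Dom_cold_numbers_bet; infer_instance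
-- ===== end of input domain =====

-- B replaces A's sort-slice-sort pipeline by a sort-free rank-based selection (alternative decomposition, same cost class).


-- ===== PORT A =====
-- recent = history[-window:] if len(history) >= window else history   (shared shape of both Pythons)
def coldRecent (history : List (List (String × List Int))) (window : Int) : List (List (String × List Int)) :=
  if (history.length : Int) ≥ window then PySem.List.slice history (some (-window)) none else history

-- freq = Counter(n for d in recent for n in d['numbers'] if n <= MAX_NUM)   (shared by both Pythons verbatim;
-- d['numbers'] is PySem.Dict.get?; the .getD [] default is only reached outside Pre_cold_numbers_bet)
def coldFreq (recent : List (List (String × List Int))) : PySem.Dict Int Int :=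
  PySem.Dict.counter
    (recent.flatMap (fun d => ((PySem.Dict.mk d).get? "numbers").getD [] |>.filter (fun n => n ≤ 49)))

def cold_numbers_bet (history : List (List (String × List Int))) (window : Int) (exclude : Option (List Int)) : List Int :=
  -- exclude = exclude or set()  (None and the empty list both give the empty set; membership is all that is used)
  let excl : List Int := (exclude.getD [])
  let recent := coldRecent history window
  let freq := coldFreq recent
  let candidates :=
    PySem.List.sorted ((PySem.List.pyRange 1 50 1).filter (fun n => !(excl.contains n)))
      (fun x => freq.getD x 0) false
  PySem.List.sorted (PySem.List.slice candidates none (some 6)) (fun x => x) false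

-- ===== PORT B =====
-- rank(n) = len([m for m in range(1, MAX_NUM+1) if m not in exclude and (freq.get(m,0), m) < (freq.get(n,0), n)])
-- (the Python tuple comparison is written out as its lexicographic meaning)
def coldRank (freq : PySem.Dict Int Int) (excl : List Int) (n : Int) : Int :=
  (((PySem.List.pyRange 1 50 1).filter
      (fun m => !(excl.contains m) &&
        (decide (freq.getD m 0 < freq.getD n 0) ||
         (decide (freq.getD m 0 = freq.getD n 0) && decide (m < n))))).length : Int)

def cold_numbers_bet_alt (history : List (List (String × List Int))) (window : Int) (exclude : Option (List Int)) : List Int :=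
  let excl : List Int := (exclude.getD [])
  let recent := coldRecent history window
  let freq := coldFreq recent
  (PySem.List.pyRange 1 50 1).filter (fun n => !(excl.contains n) && decide (coldRank freq excl n < 6))

-- ===== PRECONDITION & SPEC =====
-- Pre_ excludes exactly the inputs where some draw inside the recent window has no 'numbers' key, on which A raises KeyError.
def Pre_cold_numbers_bet (history : List (List (String × List Int))) (window : Int) (exclude : Option (List Int)) : Prop :=
  ∀ d ∈ coldRecent history window, (PySem.Dict.mk d).contains "numbers" = true
instance (history : List (List (String × List Int))) (window : Int) (exclude : Option (List Int)) : Decidable (Pre_cold_numbers_bet history window exclude) := by unfold Pre_cold_numbers_bet; infer_instance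

def pvWitness_cold_numbers_bet : (List (List (String × List Int))) × Int × Option (List Int) :=
  ([[("numbers", [3, 7, 3])], [("numbers", [7, 50])]], 100, some [5, 9])

def Spec_cold_numbers_bet (history : List (List (String × List Int))) (window : Int) (exclude : Option (List Int)) (out : List Int) : Prop := out = cold_numbers_bet_alt history window exclude
instance (history : List (List (String × List Int))) (window : Int) (exclude : Option (List Int)) (out : List Int) : Decidable (Spec_cold_numbers_bet history window exclude out) := by unfold Spec_cold_numbers_bet; infer_instance

-- ===== CLAIM (what is proved, stated in full; the proofs are below) =====
def Claim_equal_cold_numbers_bet : Prop := ∀ (history : List (List (String × List Int))) (window : Int) (exclude : Option (List Int)), Dom_cold_numbers_bet history window exclude → Pre_cold_numbers_bet history window exclude → Spec_cold_numbers_bet history window exclude (cold_numbers_bet history window exclude)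

-- ===== LEMMAS AND PROOFS =====

-- The strict lexicographic order on (key n, n) that B's rank counts, and its Bool form.
def lexLt (key : Int → Int) (m n : Int) : Prop := key m < key n ∨ (key m = key n ∧ m < n)

def lexb (key : Int → Int) (m n : Int) : Bool :=
  decide (key m < key n) || (decide (key m = key n) && decide (m < n))

theorem lexb_iff (key : Int → Int) (m n : Int) : lexb key m n = true ↔ lexLt key m n := by
  simp [lexb, lexLt]

theorem lexLt_irrefl (key : Int → Int) (n : Int) : ¬ lexLt key n n := by
  simp [lexLt]

theorem lexLt_asymm (key : Int → Int) {m n : Int} (h : lexLt key m n) : ¬ lexLt key n m := by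
  rcases h with h | ⟨h, h'⟩ <;> rintro (g | ⟨g, g'⟩) <;> omega

theorem lexLt_trans (key : Int → Int) {a b c : Int} (h1 : lexLt key a b) (h2 : lexLt key b c) :
    lexLt key a c := by
  rcases h1 with h1 | ⟨h1, h1'⟩ <;> rcases h2 with h2 | ⟨h2, h2'⟩ <;> unfold lexLt <;> omega

-- inserting an element larger (in id) than everything present keeps Pairwise (lexLt key)
theorem insertBy_pairwise_lexLt (key : Int → Int) (x : Int) (ys : List Int)
    (hp : ys.Pairwise (lexLt key)) (hlt : ∀ y ∈ ys, y < x) :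
    (PySem.List.insertBy (fun a b => decide (key a < key b)) x ys).Pairwise (lexLt key) := by
  induction ys with
  | nil => simp [PySem.List.insertBy]
  | cons y ys ih =>
    rw [List.pairwise_cons] at hp
    simp only [PySem.List.insertBy]
    by_cases h : key x < key y
    · simp only [h, decide_true, if_true]
      constructor
      · intro b hb
        rw [List.mem_cons] at hb
        rcases hb with rfl | hb
        · exact Or.inl (by omega)
        · exact lexLt_trans key (Or.inl h) (hp.1 b hb)
      · exact List.pairwise_cons.mpr hp
    · simp only [h, decide_false]
      rw [if_neg (by simp)]
      constructor
      · intro b hb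
        rw [PySem.List.mem_insertBy] at hb
        rcases hb with rfl | hb
        · -- lexLt y x : key y ≤ key x (¬ key x < key y) and y < x
          have := hlt y (by simp)
          unfold lexLt; omega
        · exact hp.1 b hb
      · exact ih hp.2 (fun a ha => hlt a (by simp [ha]))

theorem sorted_pairwise_lexLt (key : Int → Int) (xs : List Int) (hx : xs.Pairwise (· < ·)) :
    (PySem.List.sorted xs key false).Pairwise (lexLt key) := by
  rw [PySem.List.sorted_eq_foldl_insertBy]
  suffices h : ∀ (l : List Int) (acc : List Int), l.Pairwise (· < ·) → acc.Pairwise (lexLt key) →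
      (∀ a ∈ acc, ∀ b ∈ l, a < b) →
      (l.foldl (fun acc x => PySem.List.insertBy (fun a b => decide (key a < key b)) x acc) acc).Pairwise (lexLt key) by
    exact h xs [] hx (by simp) (by simp)
  intro l
  induction l with
  | nil => intro acc _ hacc _; simpa using hacc
  | cons x l ih =>
    intro acc hl hacc hsep
    rw [List.pairwise_cons] at hl
    simp only [List.foldl_cons]
    apply ih _ hl.2
    · exact insertBy_pairwise_lexLt key x acc hacc (fun y hy => hsep y hy x (by simp))
    · intro a ha b hb
      rw [PySem.List.mem_insertBy] at ha
      rcases ha with rfl | ha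
      · exact hl.1 b hb
      · exact hsep a ha b (by simp [hb])

-- in a lexLt-sorted list, membership in the first k elements ↔ fewer than k elements rank below
theorem mem_take_iff_countP_lt (key : Int → Int) (s : List Int)
    (hs : s.Pairwise (lexLt key)) (x : Int) (hx : x ∈ s) (k : Nat) :
    (x ∈ s.take k ↔ (s.filter (fun m => lexb key m x)).length < k) := by
  induction s generalizing k with
  | nil => simp at hx
  | cons h t ih =>
    rw [List.pairwise_cons] at hs
    rw [List.mem_cons] at hx
    rcases hx with rfl | hx
    · -- x is the head: nothing in x :: t ranks below x
      have hf : (x :: t).filter (fun m => lexb key m x) = [] := by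
        rw [List.filter_eq_nil_iff]
        intro m hm
        rw [List.mem_cons] at hm
        have hnl : ¬ lexLt key m x := by
          rcases hm with rfl | hm
          · exact lexLt_irrefl key m
          · exact lexLt_asymm key (hs.1 m hm)
        have hfalse : lexb key m x = false := by
          rw [← Bool.not_eq_true, lexb_iff]; exact hnl
        simp [hfalse]
      rw [hf]
      cases k with
      | zero => simp
      | succ k => simp
    · -- x is in the tail; in particular x ≠ h and lexLt h x
      have hhx : lexLt key h x := hs.1 x hx
      have hne : x ≠ h := by rintro rfl; exact lexLt_irrefl key x hhx
      have hb : lexb key h x = true := (lexb_iff key h x).mpr hhx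
      cases k with
      | zero => simp
      | succ k =>
        have ihk := ih hs.2 hx k
        simp only [List.take_succ_cons, List.mem_cons, List.filter_cons, hb, if_true,
          List.length_cons]
        constructor
        · rintro (rfl | hmem)
          · exact absurd rfl hne
          · have := ihk.mp hmem; omega
        · intro hlen
          exact Or.inr (ihk.mpr (by omega))

-- A's sort-slice-sort equals B's rank filter, over any strictly increasing candidate list.
theorem cold_main (key : Int → Int) (cand : List Int) (hc : cand.Pairwise (· < ·)) :
    PySem.List.sorted ((PySem.List.sorted cand key false).take 6) (fun x => x) false
      = cand.filter (fun n => decide (((cand.filter (fun m => lexb key m n)).length : Int) < 6)) := by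
  set s := PySem.List.sorted cand key false with hsdef
  have hperm : s.Perm cand := PySem.List.sorted_perm cand key false
  have hs : s.Pairwise (lexLt key) := sorted_pairwise_lexLt key cand hc
  have nodup_s : s.Nodup := hs.imp (fun {a b} h => by rintro rfl; exact lexLt_irrefl key a h)
  have nodup_cand : cand.Nodup := hc.imp (fun {a b} h => by omega)
  have hfiltlen : ∀ n, (s.filter (fun m => lexb key m n)).length
      = (cand.filter (fun m => lexb key m n)).length :=
    fun n => (List.Perm.filter _ hperm).length_eq
  apply PySem.List.sorted_eq_of_perm_of_pairwise_lt
  · -- the rank filter is a permutation of take 6 of the sorted list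
    rw [List.perm_ext_iff_of_nodup (nodup_cand.filter _) (nodup_s.sublist (List.take_sublist 6 s))]
    intro a
    rw [List.mem_filter]
    constructor
    · rintro ⟨hmem, hcond⟩
      have ha : a ∈ s := hperm.mem_iff.mpr hmem
      rw [mem_take_iff_countP_lt key s hs a ha 6, hfiltlen a]
      simp only [decide_eq_true_eq] at hcond
      omega
    · intro hmem
      have ha : a ∈ s := (List.take_sublist 6 s).mem hmem
      have hcnt := (mem_take_iff_countP_lt key s hs a ha 6).mp hmem
      rw [hfiltlen a] at hcnt
      refine ⟨hperm.mem_iff.mp ha, ?_⟩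
      simp only [decide_eq_true_eq]
      omega
  · -- the rank filter is strictly increasing in the identity key
    exact (hc.sublist List.filter_sublist).imp (fun {a b} h => h)

-- ===== VERDICT (by name: the statement is the Claim_ definition above) =====
theorem cold_numbers_bet_spec : Claim_equal_cold_numbers_bet := by
  intro history window exclude _ _
  unfold Spec_cold_numbers_bet cold_numbers_bet cold_numbers_bet_alt
  dsimp only
  set excl : List Int := exclude.getD [] with hexcl
  set freq := coldFreq (coldRecent history window) with hfreq
  set key : Int → Int := fun x => freq.getD x 0 with hkey
  set cand : List Int := (PySem.List.pyRange 1 50 1).filter (fun n => !(excl.contains n)) with hcand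
  have hc : cand.Pairwise (· < ·) :=
    ((PySem.List.pairwise_lt_pyRange_one 1 50).sublist List.filter_sublist).imp (fun {a b} h => h)
  rw [PySem.List.slice_to _ (by norm_num : (0:Int) ≤ 6)]
  have h6 : ((6:Int)).toNat = 6 := rfl
  rw [h6, cold_main key cand hc]
  -- identify B's double-condition filters with the nested filters of cold_main
  unfold coldRank
  rw [hcand, List.filter_filter]
  apply List.filter_congr
  intro n _
  rw [List.filter_filter]
  simp only [lexb, Bool.and_comm, hkey]

theorem cold_numbers_bet_witness :
    Dom_cold_numbers_bet (pvWitness_cold_numbers_bet.1) (pvWitness_cold_numbers_bet.2.1) (pvWitness_cold_numbers_bet.2.2) ∧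
    Pre_cold_numbers_bet (pvWitness_cold_numbers_bet.1) (pvWitness_cold_numbers_bet.2.1) (pvWitness_cold_numbers_bet.2.2) := by
  constructor <;> decide
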